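-- pv_equiv track=rewrite | github.com/ZairaFrine/sortingAlgo | bubblesMod.py | preOrderBubble
-- ===== SOURCE A (Python) =====
-- def preOrderBubble(arrPO):
--   arrPO = arrPO[::-1]  # Se invierte la Lista
--   front = 0
--   last = len(arrPO) - 1
--
--   while front < last:  # tomar el primer elemento y el último del arreglo y compararlos.
--     if arrPO[front] > arrPO[last]: # Si el primero es mayor que el último intercambia
--         arrPO[front], arrPO[last] = arrPO[last], arrPO[front]
--
--     front += 1 # Avanza en el siguiente elemento
--     last -= 1 # Retrocede al anterior elemento
--     #Se cicla hasta que se llega a los elementos centrales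
--
--   return arrPO
-- ===== SOURCE B (Python) =====
-- def preOrderBubble(arrPO):
--     n = len(arrPO)
--     return [min(arrPO[i], arrPO[n - 1 - i]) if 2 * i < n - 1
--             else max(arrPO[i], arrPO[n - 1 - i])
--             for i in range(n)]
-- ===== Notes on version B (the rewrite author's own statement) =====
-- stated objective: simpler
-- what changed: Replaces A's reverse-the-list-then-two-pointer in-place swap loop with a single comprehension over the original indices that places min/max of each symmetric pair directly (no reversal, no mutation).
import Mathlib
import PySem

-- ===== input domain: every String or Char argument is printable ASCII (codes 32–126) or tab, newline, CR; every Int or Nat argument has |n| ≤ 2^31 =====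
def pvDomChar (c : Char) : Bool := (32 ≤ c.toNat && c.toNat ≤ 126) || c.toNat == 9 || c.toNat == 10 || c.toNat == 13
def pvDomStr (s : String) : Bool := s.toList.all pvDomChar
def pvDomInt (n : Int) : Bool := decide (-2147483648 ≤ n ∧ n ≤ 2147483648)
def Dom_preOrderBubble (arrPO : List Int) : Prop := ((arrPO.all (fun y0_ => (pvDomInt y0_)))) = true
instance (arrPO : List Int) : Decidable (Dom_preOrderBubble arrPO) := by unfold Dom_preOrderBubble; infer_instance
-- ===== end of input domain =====

-- B replaces the reverse-then-two-pointer swap loop with a single index-driven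
-- comprehension placing min/max of each symmetric pair directly (objective: simpler).

-- ===== PORT A =====
-- while front < last: compare arrPO[front], arrPO[last], swap if out of order
def pvLoopA (arr : List Int) (front last : Int) : List Int :=
  if front < last then
    let x := PySem.List.pyGetD arr front 0   -- index always in range in A's loop
    let y := PySem.List.pyGetD arr last 0
    let arr' := if x > y then (arr.set front.toNat y).set last.toNat x else arr
    pvLoopA arr' (front + 1) (last - 1)
  else arr
termination_by (last - front).toNat
decreasing_by omega

def preOrderBubble (arrPO : List Int) : List Int :=
  let arr := (PySem.List.slice? arrPO none none (-1)).getD []   -- arrPO[::-1]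
  pvLoopA arr 0 ((arr.length : Int) - 1)

-- ===== PORT B =====
def preOrderBubble_alt (arrPO : List Int) : List Int :=
  let n : Int := arrPO.length
  (PySem.List.pyRange 0 n 1).map (fun i =>
    if 2 * i < n - 1 then
      min (PySem.List.pyGetD arrPO i 0) (PySem.List.pyGetD arrPO (n - 1 - i) 0)
    else
      max (PySem.List.pyGetD arrPO i 0) (PySem.List.pyGetD arrPO (n - 1 - i) 0))

-- ===== PRECONDITION & SPEC =====
def Spec_preOrderBubble (arrPO : List Int) (out : List Int) : Prop := out = preOrderBubble_alt arrPO
instance (arrPO : List Int) (out : List Int) : Decidable (Spec_preOrderBubble arrPO out) := by unfold Spec_preOrderBubble; infer_instance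

-- ===== CLAIM (what is proved, stated in full; the proofs are below) =====
def Claim_equal_preOrderBubble : Prop := ∀ (arrPO : List Int), Dom_preOrderBubble arrPO → Spec_preOrderBubble arrPO (preOrderBubble arrPO)

-- ===== LEMMAS AND PROOFS =====

-- value that A's loop leaves at position k once k has been processed
def pvPair (arr : List Int) (k : Nat) : Int :=
  if 2 * (k : Int) < (arr.length : Int) - 1 then
    min (arr.getD k 0) (arr.getD (arr.length - 1 - k) 0)
  else if 2 * (k : Int) = (arr.length : Int) - 1 then arr.getD k 0
  else max (arr.getD k 0) (arr.getD (arr.length - 1 - k) 0)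

theorem pvLoopA_length (arr : List Int) (f l : Int) :
    (pvLoopA arr f l).length = arr.length := by
  fun_induction pvLoopA arr f l with
  | case1 arr f l h x y arr' ih =>
      simp only [ih, arr']
      split <;> simp
  | case2 => rfl

theorem getD_set_ne (xs : List Int) (i j : Nat) (v : Int) (h : i ≠ j) :
    (xs.set i v).getD j 0 = xs.getD j 0 := by
  simp [List.getD_eq_getElem?_getD, List.getElem?_set_ne h]

theorem getD_set_self (xs : List Int) (i : Nat) (v : Int) (h : i < xs.length) :
    (xs.set i v).getD i 0 = v := by
  simp [List.getD_eq_getElem?_getD, h]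

theorem pvLoopA_getD (arr : List Int) (f l : Int) :
    0 ≤ f → f + l = (arr.length : Int) - 1 → ∀ k : Nat, k < arr.length →
    (pvLoopA arr f l).getD k 0 =
      (if f ≤ (k : Int) ∧ (k : Int) ≤ l then pvPair arr k else arr.getD k 0) := by
  fun_induction pvLoopA arr f l with
  | case1 arr f l h x y arr' ih =>
    intro hf hsum k hk
    have hlen : arr'.length = arr.length := by
      simp only [arr']; split <;> simp
    obtain ⟨F, rfl⟩ : ∃ F : Nat, (F : Int) = f := ⟨f.toNat, Int.toNat_of_nonneg hf⟩
    obtain ⟨L, rfl⟩ : ∃ L : Nat, (L : Int) = l :=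
      ⟨l.toNat, Int.toNat_of_nonneg (by omega)⟩
    have hFL : F < L := by exact_mod_cast h
    have hLlen : L < arr.length := by omega
    have hx : x = arr.getD F 0 := by
      simp [x, PySem.List.pyGetD_natCast, List.getD]
    have hy : y = arr.getD L 0 := by
      simp [y, PySem.List.pyGetD_natCast, List.getD]
    have hother : ∀ j : Nat, j ≠ F → j ≠ L → arr'.getD j 0 = arr.getD j 0 := by
      intro j h1 h2
      simp only [arr']
      split
      · rw [Int.toNat_natCast, Int.toNat_natCast,
          getD_set_ne _ _ _ _ (Ne.symm h2), getD_set_ne _ _ _ _ (Ne.symm h1)]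
      · rfl
    have hAf : arr'.getD F 0 = min (arr.getD F 0) (arr.getD L 0) := by
      simp only [arr']
      split
      · next hgt =>
        rw [Int.toNat_natCast, Int.toNat_natCast,
          getD_set_ne _ _ _ _ (by omega), getD_set_self _ _ _ (by omega)]
        rw [hx, hy] at hgt
        omega
      · next hle =>
        rw [hx, hy] at hle
        omega
    have hAl : arr'.getD L 0 = max (arr.getD F 0) (arr.getD L 0) := by
      simp only [arr']
      split
      · next hgt =>
        rw [Int.toNat_natCast, Int.toNat_natCast,
          getD_set_self _ _ _ (by simpa using hLlen)]
        rw [hx, hy] at hgt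
        omega
      · next hle =>
        rw [hx, hy] at hle
        omega
    rw [ih (by omega) (by rw [hlen]; omega) k (by omega)]
    by_cases hin : F + 1 ≤ k ∧ k ≤ L - 1
    · -- strictly inside: untouched pair
      rw [if_pos (by omega), if_pos (by omega)]
      have hk2 : arr.length - 1 - k ≠ F := by omega
      have hk3 : arr.length - 1 - k ≠ L := by omega
      simp only [pvPair, hlen]
      rw [hother k (by omega) (by omega), hother _ hk2 hk3]
    · by_cases hkF : k = F
      · subst hkF
        rw [if_neg (by omega), if_pos (by omega)]
        have hmid : arr.length - 1 - k = L := by omega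
        rw [hAf]
        simp only [pvPair, hmid]
        rw [if_pos (by omega)]
      · by_cases hkL : k = L
        · subst hkL
          rw [if_neg (by omega), if_pos (by omega)]
          have hmid : arr.length - 1 - k = F := by omega
          rw [hAl]
          simp only [pvPair, hmid]
          rw [if_neg (by omega), if_neg (by omega)]
          omega
        · -- outside the untreated window entirely
          rw [if_neg (by omega), if_neg (by omega)]
          exact hother k hkF hkL
  | case2 arr f l h =>
    intro hf hsum k hk
    split
    · next hcond =>
      have hkl : (k : Int) = f ∧ (k : Int) = l := by omega
      simp only [pvPair]
      rw [if_neg (by omega), if_pos (by omega)]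
    · rfl

theorem preOrderBubble_eq (arrPO : List Int) :
    preOrderBubble arrPO = preOrderBubble_alt arrPO := by
  simp only [preOrderBubble, preOrderBubble_alt, PySem.List.slice?_none_none_neg_one,
    Option.getD_some]
  set r := arrPO.reverse with hr
  have hlenr : r.length = arrPO.length := by simp [hr]
  apply List.ext_getElem
  · rw [pvLoopA_length, List.length_map, PySem.List.length_pyRange_one]
    omega
  · intro k h1 h2
    have hk : k < arrPO.length := by
      have := pvLoopA_length r 0 ((r.length : Int) - 1)
      omega
    have hkr : k < r.length := by omega
    rw [← List.getD_eq_getElem _ 0 h1, ← List.getD_eq_getElem _ 0 h2]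
    rw [pvLoopA_getD r 0 ((r.length : Int) - 1) le_rfl (by omega) k hkr]
    rw [if_pos (by constructor <;> omega)]
    -- right-hand side: element k of the comprehension
    rw [List.getD_eq_getElem _ 0 h2, List.getElem_map, PySem.List.getElem_pyRange_one]
    have hrev : ∀ j : Nat, j < arrPO.length → r.getD j 0 = arrPO.getD (arrPO.length - 1 - j) 0 := by
      intro j hj
      rw [List.getD_eq_getElem _ 0 (by omega), List.getD_eq_getElem _ 0 (by omega)]
      simp [hr, List.getElem_reverse]
    have hsym : arrPO.length - 1 - (arrPO.length - 1 - k) = k := by omega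
    have hg1 : PySem.List.pyGetD arrPO (0 + (k : Int)) 0 = arrPO.getD k 0 := by
      rw [zero_add, PySem.List.pyGetD_natCast, List.getD]
    have hg2 : PySem.List.pyGetD arrPO ((arrPO.length : Int) - 1 - (0 + (k : Int))) 0
        = arrPO.getD (arrPO.length - 1 - k) 0 := by
      have : (arrPO.length : Int) - 1 - (0 + (k : Int)) = ((arrPO.length - 1 - k : Nat) : Int) := by
        omega
      rw [this, PySem.List.pyGetD_natCast, List.getD]
    simp only [pvPair, hlenr, hg1, hg2,
      hrev k hk, hrev (arrPO.length - 1 - k) (by omega), hsym]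
    by_cases hlt : 2 * (k : Int) < (arrPO.length : Int) - 1
    · rw [if_pos hlt, if_pos (by omega), min_comm]
    · by_cases heq : 2 * (k : Int) = (arrPO.length : Int) - 1
      · have : arrPO.length - 1 - k = k := by omega
        rw [if_neg hlt, if_pos heq, if_neg (by omega), this, max_self]
      · rw [if_neg hlt, if_neg heq, if_neg (by omega), max_comm]

-- ===== VERDICT (by name: the statement is the Claim_ definition above) =====
theorem preOrderBubble_spec : Claim_equal_preOrderBubble := by
  intro arrPO _
  exact preOrderBubble_eq arrPO
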